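-- pv_equiv track=rewrite | github.com/antonkrupin/algorithms | generator/generators.py | long_process
-- ===== SOURCE A (Python) =====
-- def long_process(id,n):
--     sum = 0
--     if n > 0:
--         for x in range(n):
--             sum += x
--             if x < n-1:
--                 yield
--             else:
--                 yield sum
--     else:
--         yield sum
-- ===== SOURCE B (Python) =====
-- def long_process(id, n):
--     if n <= 0:
--         yield 0
--         return
--     for _ in range(n - 1):
--         yield None
--     yield n * (n - 1) // 2
-- ===== Notes on version B (the rewrite author's own statement) =====
-- stated objective: simpler
-- what changed: Splits the generator into a None-emission phase (n-1 yields) followed by one terminal yield of the closed-form triangular number n*(n-1)//2, dropping A's running accumulator and the per-iteration x < n-1 branch (less per-step work).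
import Mathlib
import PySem

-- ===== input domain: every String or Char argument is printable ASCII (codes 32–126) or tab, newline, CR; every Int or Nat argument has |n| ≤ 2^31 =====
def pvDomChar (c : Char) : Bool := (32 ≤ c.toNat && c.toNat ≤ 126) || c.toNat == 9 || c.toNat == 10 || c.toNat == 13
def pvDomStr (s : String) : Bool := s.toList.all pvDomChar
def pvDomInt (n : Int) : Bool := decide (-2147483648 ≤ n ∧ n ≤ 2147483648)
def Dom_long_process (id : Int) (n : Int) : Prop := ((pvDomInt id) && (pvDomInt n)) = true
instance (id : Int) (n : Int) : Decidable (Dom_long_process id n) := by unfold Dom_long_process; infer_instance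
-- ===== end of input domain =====

-- B replaces A's running accumulator and per-iteration branch by a None-emission phase
-- followed by one closed-form terminal yield n*(n-1)//2 (objective: simpler).


-- ===== PORT A =====
-- literal port: the generator's yielded values collected in order; state = (sum, yields so far)
def long_process (id : Int) (n : Int) : List (Option Int) :=
  if n > 0 then
    ((PySem.List.pyRange 0 n 1).foldl
      (fun (st : Int × List (Option Int)) x =>
        (st.1 + x, st.2 ++ [if x < n - 1 then none else some (st.1 + x)]))
      (0, [])).2
  else [some 0]

-- ===== PORT B =====
def long_process_alt (id : Int) (n : Int) : List (Option Int) :=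
  if n ≤ 0 then [some 0]
  else List.replicate (n - 1).toNat none ++ [some (PySem.Int.floordiv (n * (n - 1)) 2)]

-- ===== PRECONDITION & SPEC =====
def Spec_long_process (id : Int) (n : Int) (out : List (Option Int)) : Prop := out = long_process_alt id n
instance (id : Int) (n : Int) (out : List (Option Int)) : Decidable (Spec_long_process id n out) := by unfold Spec_long_process; infer_instance

-- ===== CLAIM (what is proved, stated in full; the proofs are below) =====
def Claim_equal_long_process : Prop := ∀ (id : Int) (n : Int), Dom_long_process id n → Spec_long_process id n (long_process id n)

-- ===== LEMMAS AND PROOFS =====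

-- folding A's body over range(m) while m ≤ n-1: every yield is None, sum accumulates Gauss-wise
theorem lp_aux (n : Int) (m : Nat) (h : (m : Int) ≤ n - 1) (init : Int × List (Option Int)) :
    (PySem.List.pyRange 0 (m : Int) 1).foldl
      (fun (st : Int × List (Option Int)) x =>
        (st.1 + x, st.2 ++ [if x < n - 1 then none else some (st.1 + x)]))
      init
    = (init.1 + (((List.range m).sum : Nat) : Int), init.2 ++ List.replicate m none) := by
  induction m generalizing init with
  | zero => simp [PySem.List.pyRange_one_eq_nil]
  | succ k ih =>
    have hk : (k : Int) ≤ n - 1 := by push_cast at h ⊢; omega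
    have hsplit : PySem.List.pyRange 0 ((k : Int) + 1) 1
        = PySem.List.pyRange 0 (k : Int) 1 ++ [(k : Int)] := by
      simpa using PySem.List.pyRange_one_succ_right (a := 0) (b := (k : Int)) (by positivity)
    have hlt : (k : Int) < n - 1 := by push_cast at h; omega
    push_cast
    rw [hsplit, List.foldl_append, ih hk]
    simp [List.range_succ, hlt, List.replicate_succ' (n := k)]
    push_cast
    ring

-- ===== VERDICT (by name: the statement is the Claim_ definition above) =====
theorem long_process_spec : Claim_equal_long_process := by
  intro id n _
  unfold Spec_long_process long_process long_process_alt
  by_cases hn : n > 0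
  · rw [if_pos hn, if_neg (by omega)]
    set m : Nat := (n - 1).toNat with hm
    have hmn : (m : Int) = n - 1 := by omega
    have hsplit : PySem.List.pyRange 0 n 1
        = PySem.List.pyRange 0 (m : Int) 1 ++ [(m : Int)] := by
      have := PySem.List.pyRange_one_succ_right (a := 0) (b := (m : Int)) (by positivity)
      rw [show (m : Int) + 1 = n by omega] at this
      simpa using this
    rw [hsplit, List.foldl_append, lp_aux n m (le_of_eq hmn)]
    have hnotlt : ¬ ((m : Int) < n - 1) := by omega
    simp only [List.foldl_cons, List.foldl_nil, hnotlt, if_false]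
    have hgauss : ∀ k : Nat, (((List.range k).sum : Nat) : Int) * 2 = (k : Int) * ((k : Int) - 1) := by
      intro k
      induction k with
      | zero => simp
      | succ j ih =>
        simp only [List.range_succ, List.sum_append, List.sum_cons, List.sum_nil]
        push_cast at ih ⊢
        nlinarith [ih]
    have hval : PySem.Int.floordiv (n * (n - 1)) 2
        = (((List.range m).sum : Nat) : Int) + (m : Int) := by
      rw [PySem.Int.floordiv_eq_ediv_of_pos (by norm_num)]
      have : n * (n - 1) = ((((List.range m).sum : Nat) : Int) + (m : Int)) * 2 := by
        have h2 : n = (m : Int) + 1 := by omega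
        rw [h2]; nlinarith [hgauss m]
      rw [this, Int.mul_ediv_cancel _ (by norm_num)]
    rw [PySem.Int.floordiv_eq_ediv_of_pos (by norm_num)] at hval
    rw [show PySem.Int.floordiv (n * (n - 1)) 2 = n * (n - 1) / 2 from
      PySem.Int.floordiv_eq_ediv_of_pos (by norm_num)]
    push_cast at hval
    simp [hval]
  · rw [if_neg hn, if_pos (by omega)]
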